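-- pv_equiv track=rewrite | github.com/MayurRajRajput/leetcode | python/1-bit_and_2-bit_Characters.py | isOneBitCharacter
-- ===== SOURCE A (Python) =====
-- from typing import List
--
-- def isOneBitCharacter(bits: List[int]) -> bool:
--     if not bits:return False
--     n = len(bits)
--     index = 0
--     while index <n:
--         if index == n-1:return True
--         if bits[index] == 1:
--             index+=2
--         else:index+=1
--     return False
-- ===== SOURCE B (Python) =====
-- from typing import List
--
-- def isOneBitCharacter(bits: List[int]) -> bool:
--     if not bits:
--         return False
--     run = 0
--     for b in reversed(bits[:-1]):
--         if b != 1: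
--             break
--         run += 1
--     return run % 2 == 0
-- ===== Notes on version B (the rewrite author's own statement) =====
-- stated objective: alternative
-- what changed: Replaces the forward step-by-step parse (jump 2 on a 1, 1 otherwise) by a single backward scan that counts the run of trailing 1s before the last element and returns whether that run is even.
import Mathlib
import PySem

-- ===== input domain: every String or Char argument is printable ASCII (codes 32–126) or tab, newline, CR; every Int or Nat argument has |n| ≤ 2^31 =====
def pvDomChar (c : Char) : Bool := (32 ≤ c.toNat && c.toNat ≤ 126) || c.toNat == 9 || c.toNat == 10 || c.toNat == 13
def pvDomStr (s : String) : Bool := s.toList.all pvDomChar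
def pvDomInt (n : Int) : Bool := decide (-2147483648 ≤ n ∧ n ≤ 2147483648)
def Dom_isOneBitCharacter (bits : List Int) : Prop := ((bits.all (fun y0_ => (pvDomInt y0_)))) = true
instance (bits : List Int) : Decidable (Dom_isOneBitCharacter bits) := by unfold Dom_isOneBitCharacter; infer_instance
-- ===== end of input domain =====

-- B replaces A's forward step-by-step parse by a backward count of the run of trailing 1s
-- before the last element, returning whether that run is even (alternative algorithm, same cost).

-- ===== PORT A =====
-- the while loop of A: index advances by 2 on a 1, by 1 otherwise
def goA (bits : List Int) (index : Int) : Bool :=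
  if _h : index < (bits.length : Int) then
    if index = (bits.length : Int) - 1 then true
    else
      match PySem.List.pyGet? bits index with
      | some b => if b = 1 then goA bits (index + 2) else goA bits (index + 1)
      | none => false  -- unreachable in A's loop: 0 ≤ index < len bits
  else false
termination_by ((bits.length : Int) - index).toNat
decreasing_by all_goals omega

def isOneBitCharacter (bits : List Int) : Bool :=
  if bits = [] then false else goA bits 0

-- ===== PORT B =====
-- the for-with-break of B: length of the leading run of 1s
def runOnes : List Int → Int
  | [] => 0
  | b :: rest => if b ≠ 1 then 0 else runOnes rest + 1

def isOneBitCharacter_alt (bits : List Int) : Bool :=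
  if bits = [] then false
  else decide (PySem.Int.mod (runOnes (PySem.List.slice bits none (some (-1))).reverse) 2 = 0)

-- ===== PRECONDITION & SPEC =====
def Spec_isOneBitCharacter (bits : List Int) (out : Bool) : Prop := out = isOneBitCharacter_alt bits
instance (bits : List Int) (out : Bool) : Decidable (Spec_isOneBitCharacter bits out) := by unfold Spec_isOneBitCharacter; infer_instance

-- ===== CLAIM (what is proved, stated in full; the proofs are below) =====
def Claim_equal_isOneBitCharacter : Prop := ∀ (bits : List Int), Dom_isOneBitCharacter bits → Spec_isOneBitCharacter bits (isOneBitCharacter bits)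

-- ===== LEMMAS AND PROOFS =====

-- functional form of A's parse, used to bridge goA with B
def parse : List Int → Bool
  | [] => false
  | a :: rest =>
    match rest with
    | [] => true
    | b :: rest' => if a = 1 then parse rest' else parse (b :: rest')

lemma parse_nil : parse [] = false := rfl
lemma parse_single (a : Int) : parse [a] = true := rfl
lemma parse_cons2 (a b : Int) (r : List Int) :
    parse (a :: b :: r) = if a = 1 then parse r else parse (b :: r) := rfl

lemma runOnes_le_length (t : List Int) : runOnes t ≤ (t.length : Int) := by
  induction t with
  | nil => simp [runOnes]
  | cons b rest ih =>
    simp only [runOnes, List.length_cons]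
    by_cases hb : b ≠ 1
    · rw [if_pos hb]; push_cast; omega
    · rw [if_neg hb]; push_cast; omega

lemma runOnes_append_single (t : List Int) (x : Int) :
    runOnes (t ++ [x]) =
      if runOnes t = (t.length : Int) then runOnes t + (if x = 1 then 1 else 0)
      else runOnes t := by
  induction t with
  | nil => simp [runOnes]
  | cons b rest ih =>
    have hle := runOnes_le_length rest
    simp only [List.cons_append, runOnes, List.length_cons, ih]
    split <;> split_ifs <;> omega

lemma runOnes_append_parity (t : List Int) (b : Int) :
    PySem.Int.mod (runOnes (t ++ [b, 1])) 2 = PySem.Int.mod (runOnes t) 2 := by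
  have h1 := runOnes_append_single t b
  have h2 := runOnes_append_single (t ++ [b]) 1
  have hle := runOnes_le_length t
  have hlen : ((t ++ [b]).length : Int) = (t.length : Int) + 1 := by simp
  have hsplit : t ++ [b, 1] = (t ++ [b]) ++ [1] := by simp
  rw [hsplit, h2, h1, PySem.Int.mod_eq_emod_of_pos (by norm_num),
    PySem.Int.mod_eq_emod_of_pos (by norm_num)]
  split_ifs at * <;> omega

lemma runOnes_append_notOne (t : List Int) (a : Int) (ha : a ≠ 1) :
    runOnes (t ++ [a]) = runOnes t := by
  rw [runOnes_append_single]; split_ifs <;> simp_all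

-- B's value as a function of the list
def F (l : List Int) : Bool := decide (PySem.Int.mod (runOnes l.dropLast.reverse) 2 = 0)

lemma parse_eq_F_aux : ∀ (n : Nat) (l : List Int), l.length ≤ n → l ≠ [] → parse l = F l := by
  intro n
  induction n with
  | zero =>
    intro l hl hne
    cases l with
    | nil => exact absurd rfl hne
    | cons a rest => simp at hl
  | succ n ih =>
    intro l hl hne
    match l with
    | [] => exact absurd rfl hne
    | [a] => rw [parse_single]; simp [F, runOnes, PySem.Int.mod]
    | a :: b :: rest =>
      rw [parse_cons2]
      by_cases ha : a = 1
      · subst ha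
        rw [if_pos rfl]
        match rest with
        | [] => rw [parse_nil]; simp [F, runOnes, PySem.Int.mod]
        | c :: rest' =>
          have hsub : parse (c :: rest') = F (c :: rest') :=
            ih (c :: rest') (by simp at hl ⊢; omega) (by simp)
          have hdl : ((1 : Int) :: b :: c :: rest').dropLast.reverse
              = (c :: rest').dropLast.reverse ++ [b, 1] := by
            simp [List.dropLast]
          rw [hsub]
          simp only [F, hdl, runOnes_append_parity]
      · rw [if_neg ha]
        have hsub : parse (b :: rest) = F (b :: rest) :=
          ih (b :: rest) (by simp at hl ⊢; omega) (by simp)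
        have hdl : (a :: b :: rest).dropLast.reverse
            = (b :: rest).dropLast.reverse ++ [a] := by
          simp [List.dropLast]
        rw [hsub]
        simp only [F, hdl, runOnes_append_notOne _ _ ha]

lemma parse_eq_F (l : List Int) (hne : l ≠ []) : parse l = F l :=
  parse_eq_F_aux l.length l le_rfl hne

lemma goA_eq_parse (bits : List Int) : ∀ (fuel : Nat) (index : Int), 0 ≤ index →
    index.toNat ≤ bits.length → bits.length - index.toNat ≤ fuel →
    goA bits index = parse (bits.drop index.toNat) := by
  intro fuel
  induction fuel with
  | zero =>
    intro index h0 hle hf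
    have heq : index.toNat = bits.length := by omega
    rw [goA.eq_def, dif_neg (by omega), List.drop_of_length_le (by omega), parse_nil]
  | succ n ih =>
    intro index h0 hle hf
    rw [goA.eq_def]
    by_cases hlt : index < (bits.length : Int)
    · rw [dif_pos hlt]
      have hidx : index.toNat < bits.length := by omega
      have hdrop : bits.drop index.toNat = bits[index.toNat] :: bits.drop (index.toNat + 1) :=
        List.drop_eq_getElem_cons hidx
      have hsome : PySem.List.pyGet? bits index = some (bits[index.toNat]) := by
        rw [PySem.List.pyGet?_of_nonneg bits h0]
        exact List.getElem?_eq_getElem hidx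
      by_cases hlast : index = (bits.length : Int) - 1
      · rw [if_pos hlast]
        have hd2 : bits.drop (index.toNat + 1) = [] := List.drop_of_length_le (by omega)
        rw [hdrop, hd2, parse_single]
      · rw [if_neg hlast, hsome]
        have hne2 : bits.drop (index.toNat + 1) ≠ [] := by
          have : (bits.drop (index.toNat + 1)).length = bits.length - (index.toNat + 1) :=
            List.length_drop ..
          intro hc; rw [hc] at this; simp at this; omega
        obtain ⟨y, ys, hys⟩ := List.exists_cons_of_ne_nil hne2
        rw [hdrop, hys, parse_cons2, ← hys]
        dsimp only
        by_cases hb : bits[index.toNat] = (1 : Int)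
        · rw [if_pos hb, if_pos hb]
          have h2 : (index + 2).toNat = index.toNat + 2 := by omega
          have hys2 : List.drop (index.toNat + 2) bits = ys := by
            rw [show index.toNat + 2 = (index.toNat + 1) + 1 from rfl, ← List.tail_drop, hys]
            rfl
          rw [ih (index + 2) (by omega) (by omega) (by omega), h2, hys2]
        · rw [if_neg hb, if_neg hb]
          have h1 : (index + 1).toNat = index.toNat + 1 := by omega
          rw [ih (index + 1) (by omega) (by omega) (by omega), h1]
    · rw [dif_neg hlt, List.drop_of_length_le (by omega), parse_nil]

-- ===== VERDICT (by name: the statement is the Claim_ definition above) =====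
theorem isOneBitCharacter_spec : Claim_equal_isOneBitCharacter := by
  intro bits _
  unfold Spec_isOneBitCharacter isOneBitCharacter isOneBitCharacter_alt
  by_cases hnil : bits = []
  · simp [hnil]
  · rw [if_neg hnil, if_neg hnil]
    have h1 : goA bits 0 = parse bits := by
      have := goA_eq_parse bits bits.length 0 (by omega) (by simp) (by simp)
      simpa using this
    have h2 : PySem.List.slice bits none (some (-1)) = bits.dropLast :=
      PySem.List.slice_to_neg_one bits
    rw [h1, h2, parse_eq_F bits hnil, F]
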